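-- pv_equiv track=rewrite | github.com/AiMiDi/C4D_MMD_Tool | sdk_r21/frameworks/settings/sourceprocessor/declarations.py | base32HashCode
-- ===== SOURCE A (Python) =====
-- def intHashCode(s):
--     hc = 0
--     for c in s:
--         hc = 31 * hc + ord(c)
--     return hc
--
-- base32Table = 'abcdefghijklmnopqrstuvwxyz234567'
--
-- def base32HashCode(str):
--     hash = intHashCode(str)
--     result = ''
--     while len(result) < 13:
--         result += base32Table[hash & 31]
--         hash >>= 5
--         if hash == 0:
--             break
--     return result
-- ===== SOURCE B (Python) =====
-- base32Table = 'abcdefghijklmnopqrstuvwxyz234567'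
--
-- _M = 1 << 65  # 32**13: more than 13 base-32 digits iff hash >= _M
--
-- def base32HashCode(str):
--     # One pass keeping the hash reduced mod 2**65 plus a flag recording
--     # whether the true hash ever reached 2**65 (it is non-decreasing).
--     h = 0
--     big = False
--     for c in str:
--         h = 31 * h + ord(c)
--         if h >= _M:
--             big = True
--             h %= _M
--     if big:
--         return ''.join(base32Table[(h >> (5 * i)) & 31] for i in range(13))
--     digits = []
--     while True:
--         digits.append(base32Table[h & 31])
--         h >>= 5
--         if h == 0:
--             break
--     return ''.join(digits)
-- ===== Notes on version B (the rewrite author's own statement) =====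
-- stated objective: faster
-- what changed: A builds the full unbounded 31-polynomial big-integer hash and then peels off up to 13 base-32 digits in a while loop; B keeps the hash reduced mod 2^65 (the 13-digit capacity) in one pass plus a sticky overflow flag, then emits exactly 13 digits if it overflowed and the natural digit expansion otherwise.
import Mathlib
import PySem

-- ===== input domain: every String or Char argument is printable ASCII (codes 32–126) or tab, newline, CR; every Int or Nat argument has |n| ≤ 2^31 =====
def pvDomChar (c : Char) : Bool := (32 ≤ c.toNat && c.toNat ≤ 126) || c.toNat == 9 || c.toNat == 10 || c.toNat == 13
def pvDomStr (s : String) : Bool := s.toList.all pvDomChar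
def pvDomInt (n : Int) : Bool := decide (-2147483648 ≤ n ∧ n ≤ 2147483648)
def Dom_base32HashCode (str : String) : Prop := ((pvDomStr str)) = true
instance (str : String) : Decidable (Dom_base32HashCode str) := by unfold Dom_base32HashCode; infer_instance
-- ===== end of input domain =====

-- B replaces A's unbounded big-integer hash by a single pass keeping the hash reduced mod 2^65
-- together with an overflow flag (objective: faster, A is quadratic in bit-operations, B linear).

-- ===== PORT A =====

def base32Table : List Char := "abcdefghijklmnopqrstuvwxyz234567".toList

-- hc = 31*hc + ord(c) over the string (hash is a non-negative Python int, ported as Nat)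
def intHashCode (s : String) : Nat :=
  s.toList.foldl (fun hc c => 31 * hc + c.toNat) 0

-- the while loop of A: append table[hash & 31], shift, break on zero or 13 chars
def aLoop (hash : Nat) (result : List Char) : List Char :=
  if result.length < 13 then
    let result' := result ++ [base32Table.getD (hash &&& 31) ' ']
    let hash' := hash >>> 5
    if hash' = 0 then result' else aLoop hash' result'
  else result
termination_by 13 - result.length
decreasing_by simp_all; omega

def base32HashCode (str : String) : String :=
  String.ofList (aLoop (intHashCode str) [])

-- ===== PORT B =====

def bM : Nat := 1 <<< 65

-- the fold of Source B: hash reduced mod 2^65, plus the sticky overflow flag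
def bStep (p : Nat × Bool) (c : Char) : Nat × Bool :=
  let h' := 31 * p.1 + c.toNat
  if bM ≤ h' then (h' % bM, true) else (h', p.2)

def bHash (s : String) : Nat × Bool :=
  s.toList.foldl bStep (0, false)

-- the digits loop of Source B (at least one digit, until the hash is zero)
def bDigits (h : Nat) : List Char :=
  let d := base32Table.getD (h &&& 31) ' '
  let h' := h >>> 5
  if h' = 0 then [d] else d :: bDigits h'
termination_by h
decreasing_by
  simp only [Nat.shiftRight_eq_div_pow] at *
  exact Nat.div_lt_self (by omega) (by norm_num)

def base32HashCode_alt (str : String) : String :=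
  let p := bHash str
  if p.2 then
    String.ofList ((List.range 13).map (fun i => base32Table.getD ((p.1 >>> (5 * i)) &&& 31) ' '))
  else
    String.ofList (bDigits p.1)

-- ===== PRECONDITION & SPEC =====
def Spec_base32HashCode (str : String) (out : String) : Prop := out = base32HashCode_alt str
instance (str : String) (out : String) : Decidable (Spec_base32HashCode str out) := by unfold Spec_base32HashCode; infer_instance

-- ===== CLAIM (what is proved, stated in full; the proofs are below) =====
def Claim_equal_base32HashCode : Prop := ∀ (str : String), Dom_base32HashCode str → Spec_base32HashCode str (base32HashCode str)

-- ===== LEMMAS AND PROOFS =====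

-- digits of h, little-endian, at most n of them, stopping when the rest is zero
def limDigits (h : Nat) : Nat → List Char
  | 0 => []
  | n + 1 =>
      base32Table.getD (h &&& 31) ' ' ::
        (if h >>> 5 = 0 then [] else limDigits (h >>> 5) n)

theorem aLoop_eq_limDigits (n : Nat) : ∀ (h : Nat) (acc : List Char),
    acc.length = 13 - n → n ≤ 13 → aLoop h acc = acc ++ limDigits h n := by
  induction n with
  | zero =>
    intro h acc hl _
    rw [aLoop]
    simp [hl, limDigits]
  | succ n ih =>
    intro h acc hl hn
    rw [aLoop]
    have hlt : acc.length < 13 := by omega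
    simp only [hlt, if_true, limDigits]
    by_cases hz : h >>> 5 = 0
    · simp [hz]
    · have hih := ih (h >>> 5) (acc ++ [base32Table.getD (h &&& 31) ' '])
        (by simp [hl]; omega) (by omega)
      simp only [List.getD_eq_getElem?_getD] at hih
      simp [hz, hih]

theorem bStep_seed (t0 : Nat) (c : Char) :
    bStep (t0 % bM, decide (bM ≤ t0)) c
      = ((31 * t0 + c.toNat) % bM, decide (bM ≤ 31 * t0 + c.toNat)) := by
  have hM : 0 < bM := by norm_num [bM, Nat.shiftLeft_eq]
  have hmod : (31 * (t0 % bM) + c.toNat) % bM = (31 * t0 + c.toNat) % bM :=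
    ((Nat.mod_modEq t0 bM).mul_left 31).add_right c.toNat
  simp only [bStep]
  by_cases hbig : bM ≤ t0
  · have ht1b : bM ≤ 31 * t0 + c.toNat := by nlinarith
    by_cases hb : bM ≤ 31 * (t0 % bM) + c.toNat
    · simp [hb, hmod, ht1b]
    · have he : 31 * (t0 % bM) + c.toNat = (31 * t0 + c.toNat) % bM := by
        rw [← hmod]; exact (Nat.mod_eq_of_lt (by omega)).symm
      simp [he, hbig, ht1b]
  · have h0 : t0 % bM = t0 := Nat.mod_eq_of_lt (by omega)
    rw [h0]
    by_cases hb : bM ≤ 31 * t0 + c.toNat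
    · simp [hb]
    · have hlt : 31 * t0 + c.toNat < bM := by omega
      simp [hb, hbig, Nat.mod_eq_of_lt hlt]

theorem bHash_spec : ∀ (l : List Char) (t0 : Nat),
    l.foldl bStep (t0 % bM, decide (bM ≤ t0))
      = ((l.foldl (fun hc c => 31 * hc + c.toNat) t0) % bM,
         decide (bM ≤ l.foldl (fun hc c => 31 * hc + c.toNat) t0)) := by
  intro l
  induction l with
  | nil => intro t0; simp
  | cons c l ih =>
    intro t0
    simp only [List.foldl_cons]
    rw [bStep_seed]
    exact ih (31 * t0 + c.toNat)

-- small case: the hash fits in 65 bits, so at most 13 digits are ever produced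
theorem limDigits_small : ∀ (n h : Nat), h < 32 ^ n → 1 ≤ n → limDigits h n = bDigits h := by
  intro n
  induction n with
  | zero => intro h _ h1; omega
  | succ n ih =>
    intro h hlt _
    rw [limDigits, bDigits]
    by_cases hz : h >>> 5 = 0
    · simp [hz]
    · have h5 : h >>> 5 = h / 32 := by
        simp [Nat.shiftRight_eq_div_pow]
      have hlt' : h >>> 5 < 32 ^ n := by
        rw [h5]
        rw [pow_succ] at hlt
        omega
      have hn1 : 1 ≤ n := by
        rcases Nat.eq_zero_or_pos n with h0 | h0
        · subst h0; simp at hlt'; omega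
        · exact h0
      simp [hz, ih (h >>> 5) hlt' hn1]

-- big case: the shifted hash never reaches zero within n steps, so all n digits come out
theorem limDigits_full : ∀ (n h : Nat), h >>> (5 * n) ≠ 0 →
    limDigits h n = (List.range n).map (fun i => base32Table.getD ((h >>> (5 * i)) &&& 31) ' ') := by
  intro n
  induction n with
  | zero => intro h _; simp [limDigits]
  | succ n ih =>
    intro h hnz
    have hsh : ∀ m : Nat, (h >>> 5) >>> (5 * m) = h >>> (5 * (m + 1)) := by
      intro m
      rw [← Nat.shiftRight_add]
      congr 1
      ring
    have hz : h >>> 5 ≠ 0 := by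
      intro h0
      apply hnz
      rw [← hsh n, h0]
      simp
    have hnz' : (h >>> 5) >>> (5 * n) ≠ 0 := by rw [hsh]; exact hnz
    rw [limDigits, if_neg hz, ih (h >>> 5) hnz', List.range_succ_eq_map]
    simp only [List.map_cons, List.map_map]
    congr 1
    apply List.map_congr_left
    intro i _
    simp [Function.comp, hsh i]

-- low base-32 digits agree before and after reduction mod 2^65
theorem digit_mod (h i : Nat) (hi : i < 13) :
    ((h % bM) >>> (5 * i)) &&& 31 = (h >>> (5 * i)) &&& 31 := by
  have hbM : bM = 2 ^ 65 := by norm_num [bM, Nat.shiftLeft_eq]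
  have h31 : (31 : Nat) = 2 ^ 5 - 1 := by norm_num
  rw [h31, Nat.and_two_pow_sub_one_eq_mod, Nat.and_two_pow_sub_one_eq_mod,
      Nat.shiftRight_eq_div_pow, Nat.shiftRight_eq_div_pow]
  have e1 : h % bM / 2 ^ (5 * i) = h / 2 ^ (5 * i) % 2 ^ (65 - 5 * i) := by
    rw [hbM, show (2 : Nat) ^ 65 = 2 ^ (5 * i) * 2 ^ (65 - 5 * i) by
      rw [← pow_add]; congr 1; omega]
    exact Nat.mod_mul_right_div_self h (2 ^ (5 * i)) (2 ^ (65 - 5 * i))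
  rw [e1, Nat.mod_mod_of_dvd]
  exact pow_dvd_pow 2 (by omega)

theorem bHash_eq (str : String) :
    bHash str = (intHashCode str % bM, decide (bM ≤ intHashCode str)) := by
  unfold bHash intHashCode
  have h := bHash_spec str.toList 0
  have h0 : (0 : Nat) % bM = 0 := Nat.zero_mod _
  have h1 : decide (bM ≤ 0) = false := by norm_num [bM, Nat.shiftLeft_eq]
  rw [h0, h1] at h
  exact h

-- ===== VERDICT (by name: the statement is the Claim_ definition above) =====
theorem base32HashCode_spec : Claim_equal_base32HashCode := by
  intro str _
  unfold Spec_base32HashCode base32HashCode base32HashCode_alt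
  rw [bHash_eq]
  set T := intHashCode str with hT
  have hA : aLoop T [] = [] ++ limDigits T 13 :=
    aLoop_eq_limDigits 13 T [] (by simp) (by omega)
  rw [hA, List.nil_append]
  have hbM : bM = 2 ^ 65 := by norm_num [bM, Nat.shiftLeft_eq]
  by_cases hbig : bM ≤ T
  · simp only [hbig, decide_true, if_pos]
    have hnz : T >>> (5 * 13) ≠ 0 := by
      rw [Nat.shiftRight_eq_div_pow]
      have : 2 ^ (5 * 13) ≤ T := by rw [show 5 * 13 = 65 by rfl, ← hbM]; exact hbig
      have := Nat.one_le_div_iff (by positivity : 0 < 2 ^ (5 * 13)) |>.mpr this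
      omega
    rw [limDigits_full 13 T hnz]
    congr 1
    apply List.map_congr_left
    intro i hi
    rw [digit_mod T i (List.mem_range.mp hi)]
  · simp only [hbig, decide_false, if_neg, Bool.false_eq_true, not_false_iff]
    rw [Nat.mod_eq_of_lt (by omega)]
    congr 1
    exact limDigits_small 13 T (by rw [show (32 : Nat) ^ 13 = 2 ^ 65 by norm_num, ← hbM]; omega)
      (by omega)
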